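-- pv_equiv track=rewrite | github.com/ThenTech/BDA-Assignments | Plagiarism/Resources/submissions/submissions/2248871.py | cleanup_spaces_middle
-- ===== SOURCE A (Python) =====
-- def cleanup_spaces_middle(s):
--     spatie = False
--     string = ""
--
--     for i in s:
--         if i == " " and not spatie :
--             spatie = True
--             string += i
--         elif i == " " and spatie:
--             spatie = True
--         else:
--             spatie = False
--             string += i
--     return string
-- ===== SOURCE B (Python) =====
-- def cleanup_spaces_middle(s):
--     parts = s.split(' ')
--     head, tail = parts[0], parts[1:]
--     kept = [head] + [p for i, p in enumerate(tail) if p or i == len(tail) - 1]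
--     return ' '.join(kept)
-- ===== Notes on version B (the rewrite author's own statement) =====
-- stated objective: faster
-- what changed: B is staged: it splits the string on single spaces, drops the empty pieces that interior space runs create while keeping the first and last piece even if empty (so boundary space runs survive as one space), and re-joins with single spaces, instead of A's character-by-character scan with a boolean flag remembering whether the previous character was a space.
import Mathlib
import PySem

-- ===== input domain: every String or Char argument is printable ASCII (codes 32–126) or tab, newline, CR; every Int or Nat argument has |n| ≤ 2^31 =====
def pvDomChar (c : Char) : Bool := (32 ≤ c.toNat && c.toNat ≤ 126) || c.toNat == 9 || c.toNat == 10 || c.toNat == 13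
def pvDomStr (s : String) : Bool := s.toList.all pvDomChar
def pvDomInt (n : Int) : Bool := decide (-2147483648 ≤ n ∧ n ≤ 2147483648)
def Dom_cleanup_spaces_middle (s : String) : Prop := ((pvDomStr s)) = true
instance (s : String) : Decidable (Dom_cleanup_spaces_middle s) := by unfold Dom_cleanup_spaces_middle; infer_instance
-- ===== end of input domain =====

-- ===== PORT A =====
-- B rewrites A's flag-based scan as staged split/filter/join passes (measurably faster in Python: bulk str.split/str.join instead of a per-character loop).
-- state = (spatie, string); 'string += i' ported as list append, joined to a String at the end
def aStep (p : Bool × List Char) (i : Char) : Bool × List Char :=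
  if i = ' ' ∧ p.1 = false then (true, p.2 ++ [i])
  else if i = ' ' ∧ p.1 = true then (true, p.2)
  else (false, p.2 ++ [i])

def cleanup_spaces_middle (s : String) : String :=
  String.mk (s.toList.foldl aStep (false, [])).2

-- ===== PORT B =====
-- the comprehension '[p for i, p in enumerate(tail) if p or i == len(tail) - 1]' of Source B
def bKeptTail (tail : List (List Char)) : List (List Char) :=
  ((PySem.List.enumerate tail).filter
    (fun ip => !(ip.2 == ([] : List Char)) || (ip.1 == (tail.length : Int) - 1))).map (·.2)

-- parts = s.split(' '); head, tail = parts[0], parts[1:]; ' '.join([head] + kept-tail)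
-- (split never returns an empty list, so the [] branch — Python's IndexError on parts[0] — is unreachable)
def cleanup_spaces_middle_alt (s : String) : String :=
  match PySem.Chars.splitOn s.toList [' '] with
  | [] => ""
  | head :: tail => String.mk (PySem.Chars.join [' '] (head :: bKeptTail tail))

-- ===== PRECONDITION & SPEC =====
def Spec_cleanup_spaces_middle (s : String) (out : String) : Prop := out = cleanup_spaces_middle_alt s
instance (s : String) (out : String) : Decidable (Spec_cleanup_spaces_middle s out) := by unfold Spec_cleanup_spaces_middle; infer_instance

-- ===== CLAIM (what is proved, stated in full; the proofs are below) =====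
def Claim_equal_cleanup_spaces_middle : Prop := ∀ (s : String), Dom_cleanup_spaces_middle s → Spec_cleanup_spaces_middle s (cleanup_spaces_middle s)

-- ===== LEMMAS AND PROOFS =====

-- canonical form of A's output: collapse each maximal space run while scanning
def altGo : List Char → List Char
  | [] => []
  | c :: rest =>
      if c = ' ' then ' ' :: altGo (rest.dropWhile (· = ' '))
      else c :: altGo rest
termination_by l => l.length
decreasing_by
  · have := List.length_dropWhile_le (· = ' ') rest; simp; omega
  · simp

-- A side: in state spatie = true, A ignores exactly the leading run of spaces
theorem foldl_aStep_true (l : List Char) : ∀ acc,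
    (List.foldl aStep (true, acc) l).2 = (List.foldl aStep (false, acc) (l.dropWhile (· = ' '))).2 := by
  induction l with
  | nil => intro acc; rfl
  | cons c rest ih =>
      intro acc
      by_cases h : c = ' '
      · simp [List.foldl_cons, aStep, h, ih]
      · simp [List.foldl_cons, aStep, h]

-- A's fold from state false appends exactly the canonical form
theorem foldl_aStep_false (l : List Char) : ∀ acc,
    (List.foldl aStep (false, acc) l).2 = acc ++ altGo l := by
  induction l using altGo.induct with
  | case1 => intro acc; simp [altGo]
  | case2 rest ih =>
      intro acc
      rw [List.foldl_cons, show aStep (false, acc) ' ' = (true, acc ++ [' ']) by simp [aStep],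
        foldl_aStep_true, ih, altGo]
      simp
  | case3 c rest h ih =>
      intro acc
      rw [List.foldl_cons, show aStep (false, acc) c = (false, acc ++ [c]) by simp [aStep, h],
        ih, altGo]
      simp [h]

-- B side: PySem's fueled splitter on the single-char separator [' '] is List.splitOnP (· == ' ')
theorem splitOn_go_eq : ∀ (fuel : Nat) (l cur : List Char) (acc : List (List Char)), l.length < fuel →
    PySem.Chars.splitOn.go [' '] fuel l cur acc =
      acc.reverse ++ (l.splitOnP (· == ' ')).modifyHead (cur.reverse ++ ·) := by
  intro fuel
  induction fuel with
  | zero => intro l cur acc h; omega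
  | succ fuel ih =>
      intro l cur acc h
      cases l with
      | nil => simp [PySem.Chars.splitOn.go, List.splitOnP_nil]
      | cons c rest =>
          by_cases hc : c = ' '
          · subst hc
            have h1 : ([' '].isPrefixOf (' ' :: rest)) = true := by simp [List.isPrefixOf]
            rw [show PySem.Chars.splitOn.go [' '] (fuel+1) (' ' :: rest) cur acc =
                PySem.Chars.splitOn.go [' '] fuel (List.drop 1 (' ' :: rest)) [] (cur.reverse :: acc) by
                  simp [PySem.Chars.splitOn.go, h1]]
            rw [ih _ _ _ (by simpa using Nat.lt_of_succ_lt_succ h)]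
            rcases hne : (rest.splitOnP (· == ' ')) with _ | ⟨p, ps⟩
            · exact absurd hne (List.splitOnP_ne_nil _ _)
            · simp [List.splitOnP_cons, hne]
          · have h1 : ([' '].isPrefixOf (c :: rest)) = false := by
              simp [List.isPrefixOf]; exact fun hcontra => hc hcontra.symm
            rw [show PySem.Chars.splitOn.go [' '] (fuel+1) (c :: rest) cur acc =
                PySem.Chars.splitOn.go [' '] fuel rest (c :: cur) acc by
                  simp [PySem.Chars.splitOn.go, h1]]
            rw [ih _ _ _ (by simpa using Nat.lt_of_succ_lt_succ h)]
            rcases hne : (rest.splitOnP (· == ' ')) with _ | ⟨p, ps⟩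
            · exact absurd hne (List.splitOnP_ne_nil _ _)
            · simp [List.splitOnP_cons, hne, hc]

theorem splitOn_space_eq (l : List Char) :
    PySem.Chars.splitOn l [' '] = l.splitOnP (· == ' ') := by
  unfold PySem.Chars.splitOn
  rw [splitOn_go_eq (l.length + 1) l [] [] (by omega)]
  rcases hne : (l.splitOnP (· == ' ')) with _ | ⟨p, ps⟩
  · exact absurd hne (List.splitOnP_ne_nil _ _)
  · simp

-- recursive form of bKeptTail: keep nonempty pieces, always keep the last one
def g2 : List (List Char) → List (List Char)
  | [] => []
  | p :: ps => if ps = [] then [p] else if p = [] then g2 ps else p :: g2 ps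

theorem g2_ne_nil (t : List (List Char)) (h : t ≠ []) : g2 t ≠ [] := by
  induction t with
  | nil => exact absurd rfl h
  | cons p ps ih =>
      by_cases hps : ps = []
      · simp [g2, hps]
      · simp only [g2, hps, if_neg hps]
        by_cases hp : p = [] <;> simp [hp, ih hps]

theorem enumFilter_eq (t : List (List Char)) : ∀ (k : Int),
    ((PySem.List.enumerate t k).filter
      (fun ip => !(ip.2 == ([] : List Char)) || (ip.1 == k + (t.length : Int) - 1))).map (·.2) = g2 t := by
  induction t with
  | nil => intro k; simp [PySem.List.enumerate, g2]
  | cons p ps ih =>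
      intro k
      by_cases hps : ps = []
      · subst hps
        simp [PySem.List.enumerate, g2]
      · have hkey : (k == (k + 1) + (ps.length : Int) - 1) = false := by
          have : 0 < ps.length := List.length_pos_iff.mpr hps
          simp only [beq_eq_false_iff_ne, ne_eq]
          omega
        have harith : k + ((p :: ps).length : Int) - 1 = (k + 1) + (ps.length : Int) - 1 := by
          simp only [List.length_cons]; push_cast; ring
        rw [show PySem.List.enumerate (p :: ps) k = (k, p) :: PySem.List.enumerate ps (k + 1) from rfl,
          List.filter_cons]
        simp only [harith]
        simp only [hkey, Bool.or_false]
        by_cases hp : p = []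
        · rw [if_neg (by simp [hp])]
          rw [ih (k + 1)]
          simp [g2, hps, hp]
        · rw [if_pos (by simp [hp])]
          simp only [List.map_cons]
          rw [ih (k + 1)]
          simp [g2, hps, hp]

theorem bKeptTail_eq (t : List (List Char)) : bKeptTail t = g2 t := by
  unfold bKeptTail
  have := enumFilter_eq t 0
  simpa using this

-- the join of the kept pieces reproduces the canonical collapsed scan
theorem join_parts_eq (l : List Char) :
    PySem.Chars.join [' ']
        ((l.splitOnP (· == ' ')).headI :: g2 (l.splitOnP (· == ' ')).tail) = altGo l ∧
    PySem.Chars.join [' '] (g2 (l.splitOnP (· == ' '))) = altGo (l.dropWhile (· = ' ')) := by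
  induction l with
  | nil =>
      simp [List.splitOnP_nil, g2, PySem.Chars.join_singleton, altGo]
  | cons c rest ih =>
      obtain ⟨ih1, ih2⟩ := ih
      rcases hne : (rest.splitOnP (· == ' ')) with _ | ⟨h, t⟩
      · exact absurd hne (List.splitOnP_ne_nil _ _)
      by_cases hc : c = ' '
      · subst hc
        have hsplit : ((' ' :: rest).splitOnP (· == ' ')) = [] :: rest.splitOnP (· == ' ') := by
          simp [List.splitOnP_cons]
        constructor
        · rw [hsplit]
          simp only [List.headI, List.tail]
          have hg2ne : g2 (rest.splitOnP (· == ' ')) ≠ [] :=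
            g2_ne_nil _ (List.splitOnP_ne_nil _ _)
          rcases hK : g2 (rest.splitOnP (· == ' ')) with _ | ⟨kk, ks⟩
          · exact absurd hK hg2ne
          rw [PySem.Chars.join_cons_cons]
          rw [show altGo (' ' :: rest) = ' ' :: altGo (rest.dropWhile (· = ' ')) by simp [altGo]]
          rw [← hK, ih2]
          simp
        · rw [hsplit]
          rw [show g2 ([] :: rest.splitOnP (· == ' ')) = g2 (rest.splitOnP (· == ' ')) by
                simp [g2, List.splitOnP_ne_nil]]
          rw [ih2]
          simp
      · have hsplit : ((c :: rest).splitOnP (· == ' ')) =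
            (c :: (rest.splitOnP (· == ' ')).headI) :: (rest.splitOnP (· == ' ')).tail := by
          simp only [List.splitOnP_cons, hne]
          simp [hc]
        have key : PySem.Chars.join [' ']
            ((c :: (rest.splitOnP (· == ' ')).headI) :: g2 (rest.splitOnP (· == ' ')).tail) =
            c :: altGo rest := by
          rcases hK : g2 (rest.splitOnP (· == ' ')).tail with _ | ⟨kk, ks⟩
          · rw [PySem.Chars.join_singleton, ← ih1, hK, PySem.Chars.join_singleton]
          · rw [PySem.Chars.join_cons_cons, ← ih1, hK, PySem.Chars.join_cons_cons]
            simp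
        constructor
        · rw [hsplit]
          simp only [List.headI, List.tail]
          rw [show altGo (c :: rest) = c :: altGo rest by simp [altGo, hc]]
          exact key
        · rw [hsplit]
          have hdw : ((c :: rest).dropWhile (· = ' ')) = c :: rest := by
            simp [List.dropWhile, hc]
          rw [hdw, show altGo (c :: rest) = c :: altGo rest by simp [altGo, hc]]
          rw [show g2 ((c :: (rest.splitOnP (· == ' ')).headI) :: (rest.splitOnP (· == ' ')).tail) =
              (c :: (rest.splitOnP (· == ' ')).headI) :: g2 (rest.splitOnP (· == ' ')).tail by
                rcases ht : (rest.splitOnP (· == ' ')).tail with _ | ⟨x, xs⟩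
                · simp [g2, ht]
                · simp [g2, ht]]
          exact key

-- ===== VERDICT (by name: the statement is the Claim_ definition above) =====
theorem cleanup_spaces_middle_spec : Claim_equal_cleanup_spaces_middle := by
  intro s _
  unfold Spec_cleanup_spaces_middle cleanup_spaces_middle cleanup_spaces_middle_alt
  rw [foldl_aStep_false, splitOn_space_eq]
  rcases hne : (s.toList.splitOnP (· == ' ')) with _ | ⟨h, t⟩
  · exact absurd hne (List.splitOnP_ne_nil _ _)
  · rw [show (match h :: t with
        | [] => ""
        | head :: tail => String.mk (PySem.Chars.join [' '] (head :: bKeptTail tail))) =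
        String.mk (PySem.Chars.join [' '] (h :: bKeptTail t)) from rfl]
    rw [bKeptTail_eq]
    have := (join_parts_eq s.toList).1
    rw [hne] at this
    simp only [List.headI, List.tail] at this
    rw [this]
    simp
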